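-- pv_equiv track=rewrite | github.com/eunhee-dev/problem-solving | 0x0d_simulation/18808/solve.py | solve
-- ===== SOURCE A (Python) =====
-- def stick(board: list[list[int]], paper: list[list[int]], bx: int, by: int) -> bool:
--     r, c = len(paper), len(paper[0])
--     sticker_coords = []
--     for i in range(r):
--         for j in range(c):
--             if paper[i][j] != 1:
--                 continue
--             if board[bx + i][by + j] == 1:
--                 return False
--             sticker_coords.append((bx + i, by + j))
--
--     for sx, sy in sticker_coords:
--         board[sx][sy] = 1
--     return True
--
-- def try_stick(board: list[list[int]], paper: list[list[int]]) -> bool: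
--     n, m = len(board), len(board[0])
--     r, c = len(paper), len(paper[0])
--     for bx in range(n - r + 1):
--         for by in range(m - c + 1):
--             if stick(board, paper, bx, by):
--                 return True
--     return False
--
-- def rotate(paper: list[list[int]]) -> list[list[int]]:
--     r, c = len(paper), len(paper[0])
--     rot_paper = [[0] * r for _ in range(c)]
--     for x in range(c):
--         for y in range(r):
--             rot_paper[x][y] = paper[r - 1 - y][x]
--     return rot_paper
--
-- def solve(n: int, m: int, papers: list[list[list[int]]]) -> int:
--     board = [[0] * m for _ in range(n)]
--     for paper in papers:
--         for _ in range(4):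
--             if try_stick(board, paper):
--                 break
--             paper = rotate(paper)
--     return sum(1 for x in range(n) for y in range(m) if board[x][y] == 1)
-- ===== SOURCE B (Python) =====
-- def _row_mask(row, c):
--     mask = 0
--     for j in range(c):
--         if row[j] == 1:
--             mask |= 1 << j
--     return mask
--
-- def _col_mask(rows, r, x):
--     mask = 0
--     for y in range(r):
--         mask |= ((rows[r - 1 - y] >> x) & 1) << y
--     return mask
--
-- def _drop(board, rows, r, c, n, m):
--     if r > n or c > m:
--         return False
--     pp = 0
--     for i in range(r):
--         pp |= rows[i] << (i * m)
--     for bx in range(n - r + 1):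
--         w = 0
--         for i in range(r):
--             w |= board[bx + i] << (i * m)
--         for by in range(m - c + 1):
--             if w & (pp << by) == 0:
--                 for i in range(r):
--                     board[bx + i] |= rows[i] << by
--                 return True
--     return False
--
-- def solve(n, m, papers):
--     board = [0] * n
--     for paper in papers:
--         r, c = len(paper), len(paper[0])
--         rows = [_row_mask(paper[i], c) for i in range(r)]
--         for _ in range(4):
--             if _drop(board, rows, r, c, n, m):
--                 break
--             rows = [_col_mask(rows, r, x) for x in range(c)]
--             r, c = c, r
--     return sum((row >> y) & 1 for row in board for y in range(m))
-- ===== Notes on version B (the rewrite author's own statement) =====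
-- stated objective: alternative
-- what changed: B replaces A's n x m grid of ints (rescanned cell-by-cell at every candidate position, written cell-by-cell on placement, swept in full for the count) with per-row bitmasks: each paper becomes a list of row masks, the r board rows of a window and the whole paper are packed into single big integers with stride m bits so each candidate position is tested by one bitwise AND against zero, placement ORs shifted masks into the rows, rotation is a bit-permutation of the masks, and the result is the sum of extracted bits.
import Mathlib
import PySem

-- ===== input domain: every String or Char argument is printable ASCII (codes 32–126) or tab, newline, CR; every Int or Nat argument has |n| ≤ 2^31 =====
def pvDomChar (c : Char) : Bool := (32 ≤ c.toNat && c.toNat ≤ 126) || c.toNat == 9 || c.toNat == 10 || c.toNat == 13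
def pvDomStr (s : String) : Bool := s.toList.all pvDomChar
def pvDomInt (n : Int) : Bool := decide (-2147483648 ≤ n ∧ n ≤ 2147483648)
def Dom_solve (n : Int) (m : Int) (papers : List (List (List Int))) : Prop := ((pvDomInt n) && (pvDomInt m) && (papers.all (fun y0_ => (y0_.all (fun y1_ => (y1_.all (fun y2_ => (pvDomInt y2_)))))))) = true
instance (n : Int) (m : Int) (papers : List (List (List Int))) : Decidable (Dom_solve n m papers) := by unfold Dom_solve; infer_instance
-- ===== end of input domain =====

-- B replaces A's cell-by-cell grid simulation by row bitmasks: each paper becomes a list of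
-- row masks, the r board rows of a candidate window and the whole paper are packed into single
-- big integers (stride m bits), so each candidate position is tested with ONE bitwise AND,
-- placement ORs shifted masks into the rows, and the final count sums extracted bits.
-- Same first-fit placement order as A; equivalence is about the return value (A builds its
-- board locally, neither mutates an argument).

-- ===== PORT A =====
def pyRange0 (k : Int) : List Int := PySem.List.pyRange 0 k 1

-- stick: scan of paper rows, collecting coords, early exit on an occupied board cell
def stickScanRow (board : List (List Int)) (paper : List (List Int)) (bx : Int) (by_ : Int)
    (i : Int) (js : List Int) (acc : List (Int × Int)) : Option (Option (List (Int × Int))) :=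
  match js with
  | [] => some (some acc)
  | j :: js' =>
    match (PySem.List.pyGet? paper i).bind (fun row => PySem.List.pyGet? row j) with
    | none => none
    | some v =>
      if v ≠ 1 then stickScanRow board paper bx by_ i js' acc
      else
        match (PySem.List.pyGet? board (bx + i)).bind (fun row => PySem.List.pyGet? row (by_ + j)) with
        | none => none
        | some b => if b = 1 then some none
                    else stickScanRow board paper bx by_ i js' (acc ++ [(bx + i, by_ + j)])

def stickScan (board : List (List Int)) (paper : List (List Int)) (bx : Int) (by_ : Int)
    (is : List Int) (c : Int) (acc : List (Int × Int)) : Option (Option (List (Int × Int))) :=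
  match is with
  | [] => some (some acc)
  | i :: is' =>
    match stickScanRow board paper bx by_ i (pyRange0 c) acc with
    | none => none
    | some none => some none
    | some (some acc') => stickScan board paper bx by_ is' c acc'

-- board[sx][sy] = 1
def writeCell (board : List (List Int)) (sx : Int) (sy : Int) : Option (List (List Int)) :=
  (PySem.List.pyGet? board sx).bind (fun row =>
    (PySem.List.pySet? row sy 1).bind (fun row' => PySem.List.pySet? board sx row'))

def writeCells (board : List (List Int)) : List (Int × Int) → Option (List (List Int))
  | [] => some board
  | (sx, sy) :: rest => (writeCell board sx sy).bind (fun b => writeCells b rest)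

def stickA (board : List (List Int)) (paper : List (List Int)) (bx : Int) (by_ : Int) :
    Option (Bool × List (List Int)) :=
  match PySem.List.pyGet? paper 0 with
  | none => none
  | some row0 =>
    match stickScan board paper bx by_ (pyRange0 (paper.length : Int)) ((row0.length : Int)) [] with
    | none => none
    | some none => some (false, board)
    | some (some coords) => (writeCells board coords).map (fun b => (true, b))

def tryBys (board : List (List Int)) (paper : List (List Int)) (bx : Int) :
    List Int → Option (Option (List (List Int)))
  | [] => some none
  | by_ :: rest =>
    match stickA board paper bx by_ with
    | none => none
    | some (true, b) => some (some b)
    | some (false, _) => tryBys board paper bx rest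

def tryBxs (board : List (List Int)) (paper : List (List Int)) (bys : List Int) :
    List Int → Option (Option (List (List Int)))
  | [] => some none
  | bx :: rest =>
    match tryBys board paper bx bys with
    | none => none
    | some (some b) => some (some b)
    | some none => tryBxs board paper bys rest

def tryStickA (board : List (List Int)) (paper : List (List Int)) : Option (Bool × List (List Int)) :=
  match PySem.List.pyGet? board 0, PySem.List.pyGet? paper 0 with
  | some brow0, some prow0 =>
    match tryBxs board paper (pyRange0 ((brow0.length : Int) - (prow0.length : Int) + 1))
        (pyRange0 ((board.length : Int) - (paper.length : Int) + 1)) with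
    | none => none
    | some none => some (false, board)
    | some (some b) => some (true, b)
  | _, _ => none

def rotateA (paper : List (List Int)) : Option (List (List Int)) :=
  match PySem.List.pyGet? paper 0 with
  | none => none
  | some row0 =>
    (pyRange0 ((row0.length : Int))).mapM (fun x =>
      (pyRange0 ((paper.length : Int))).mapM (fun y =>
        (PySem.List.pyGet? paper ((paper.length : Int) - 1 - y)).bind (fun row =>
          PySem.List.pyGet? row x)))

def rotLoopA (board : List (List Int)) (paper : List (List Int)) : Nat → Option (List (List Int))
  | 0 => some board
  | k + 1 =>
    match tryStickA board paper with
    | none => none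
    | some (true, b) => some b
    | some (false, _) => (rotateA paper).bind (fun p => rotLoopA board p k)

def papersLoopA (board : List (List Int)) : List (List (List Int)) → Option (List (List Int))
  | [] => some board
  | p :: ps => (rotLoopA board p 4).bind (fun b => papersLoopA b ps)

def countA (n : Int) (m : Int) (board : List (List Int)) : Int :=
  (pyRange0 n).foldl (fun acc x =>
    (pyRange0 m).foldl (fun acc2 y =>
      if PySem.List.pyGetD (PySem.List.pyGetD board x []) y 0 = 1 then acc2 + 1 else acc2) acc) 0

def solve (n : Int) (m : Int) (papers : List (List (List Int))) : Int :=
  let board := (pyRange0 n).map (fun _ => PySem.List.pyRepeat [(0 : Int)] m)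
  match papersLoopA board papers with
  | none => 0            -- unreachable under Pre_solve: Python raised
  | some b => countA n m b

-- ===== PORT B =====
-- board row x is the Nat whose bit y is cell (x,y); a paper is its list of row masks `rows`.

-- _row_mask: mask |= 1 << j for the 1-cells of a paper row
def rowMaskB (row : List Int) (c : Int) : Nat :=
  (pyRange0 c).foldl (fun mask j =>
    if PySem.List.pyGetD row j 0 = 1 then mask ||| ((1 : Nat) <<< j.toNat) else mask) 0

-- _col_mask: bit y of rotated column x is bit x of original row r-1-y
def colMaskB (rows : List Nat) (r : Int) (x : Int) : Nat :=
  (pyRange0 r).foldl (fun mask y =>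
    mask ||| ((((PySem.List.pyGetD rows (r - 1 - y) 0) >>> x.toNat) &&& 1) <<< y.toNat)) 0

-- pp / w : r stripe masks packed into one integer with stride m bits
def packStripes (g : Int → Nat) (m : Int) (k : Int) : Nat :=
  (pyRange0 k).foldl (fun acc i => acc ||| (g i <<< (i * m).toNat)) 0

-- board[bx+i] |= rows[i] << by for i in range(r)
def placeRows (board : List Nat) (rows : List Nat) (bx : Int) (by_ : Int) (r : Int) : List Nat :=
  (pyRange0 r).foldl (fun ms i =>
    PySem.List.pySetD ms (bx + i)
      ((PySem.List.pyGetD ms (bx + i) 0) ||| ((PySem.List.pyGetD rows i 0) <<< by_.toNat))) board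

def dropBys (board : List Nat) (rows : List Nat) (w : Nat) (pp : Nat) (bx : Int) (r : Int) :
    List Int → Bool × List Nat
  | [] => (false, board)
  | by_ :: rest =>
    if w &&& (pp <<< by_.toNat) = 0 then (true, placeRows board rows bx by_ r)
    else dropBys board rows w pp bx r rest

def dropBxs (board : List Nat) (rows : List Nat) (pp : Nat) (r : Int) (m : Int)
    (bys : List Int) : List Int → Bool × List Nat
  | [] => (false, board)
  | bx :: rest =>
    match dropBys board rows (packStripes (fun i => PySem.List.pyGetD board (bx + i) 0) m r)
        pp bx r bys with
    | (true, b) => (true, b)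
    | (false, _) => dropBxs board rows pp r m bys rest

def dropB (board : List Nat) (rows : List Nat) (r : Int) (c : Int) (n : Int) (m : Int) :
    Bool × List Nat :=
  if r > n ∨ c > m then (false, board)
  else dropBxs board rows (packStripes (fun i => PySem.List.pyGetD rows i 0) m r) r m
    (pyRange0 (m - c + 1)) (pyRange0 (n - r + 1))

def rotB (rows : List Nat) (r : Int) (c : Int) : List Nat :=
  (pyRange0 c).map (fun x => colMaskB rows r x)

def rotLoopB (board : List Nat) (rows : List Nat) (r : Int) (c : Int) (n : Int) (m : Int) :
    Nat → List Nat
  | 0 => board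
  | k + 1 =>
    match dropB board rows r c n m with
    | (true, b) => b
    | (false, _) => rotLoopB board (rotB rows r c) c r n m k

def papersLoopB (n : Int) (m : Int) (board : List Nat) : List (List (List Int)) → List Nat
  | [] => board
  | p :: ps =>
    let r : Int := (p.length : Int)
    let c : Int := ((PySem.List.pyGetD p 0 []).length : Int)
    let rows := (pyRange0 r).map (fun i => rowMaskB (PySem.List.pyGetD p i []) c)
    papersLoopB n m (rotLoopB board rows r c n m 4) ps

def solve_alt (n : Int) (m : Int) (papers : List (List (List Int))) : Int :=
  let board := PySem.List.pyRepeat [(0 : Nat)] n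
  (papersLoopB n m board papers).foldl (fun acc row =>
    (pyRange0 m).foldl (fun acc2 y => acc2 + (((row >>> y.toNat) &&& 1 : Nat) : Int)) acc) 0

-- ===== PRECONDITION & SPEC =====
-- Pre_solve holds exactly where Python A returns normally: a nonempty board when there are
-- papers (else len(board[0]) raises), every paper nonempty with every row at least as long as
-- its first row (else paper[i][j] / rotate raises), and a paper with empty rows needs
-- 0 ≤ m and vertical fit (else it never sticks, its rotation is [] and len(paper[0]) raises).
def Pre_solve (n : Int) (m : Int) (papers : List (List (List Int))) : Prop :=
  (papers = [] ∨ 1 ≤ n) ∧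
  ∀ p ∈ papers, p ≠ [] ∧ (∀ row ∈ p, p.headI.length ≤ row.length) ∧
    (p.headI.length = 0 → (p.length : Int) ≤ n ∧ 0 ≤ m)
instance (n : Int) (m : Int) (papers : List (List (List Int))) : Decidable (Pre_solve n m papers) := by
  unfold Pre_solve; infer_instance

def pvWitness_solve : Int × Int × List (List (List Int)) := (2, 2, [[[1, 0], [1, 1]]])

def Spec_solve (n : Int) (m : Int) (papers : List (List (List Int))) (out : Int) : Prop := out = solve_alt n m papers
instance (n : Int) (m : Int) (papers : List (List (List Int))) (out : Int) : Decidable (Spec_solve n m papers out) := by unfold Spec_solve; infer_instance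

-- ===== CLAIM (what is proved, stated in full; the proofs are below) =====
def Claim_equal_solve : Prop := ∀ (n : Int) (m : Int) (papers : List (List (List Int))), Dom_solve n m papers → Pre_solve n m papers → Spec_solve n m papers (solve n m papers)

-- ===== LEMMAS AND PROOFS =====

-- proof-only definitions
def cellAt (board : List (List Int)) (x : Int) (y : Int) : Int :=
  PySem.List.pyGetD (PySem.List.pyGetD board x []) y 0

def Shape (n : Int) (m : Int) (board : List (List Int)) : Prop :=
  board.length = n.toNat ∧ ∀ row ∈ board, row.length = m.toNat

-- masks/board relation: bit y of mask row x ⟺ cell (x,y) of A's board is 1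
def MRel (n : Int) (m : Int) (board : List (List Int)) (masks : List Nat) : Prop :=
  Shape n m board ∧ masks.length = n.toNat ∧
  ∀ x : Int, 0 ≤ x → x < n → ∀ y : Nat,
    ((PySem.List.pyGetD masks x 0).testBit y = true ↔ ((y : Int) < m ∧ cellAt board x (y : Int) = 1))

-- rows/paper relation
def RSpec (P : List (List Int)) (r : Int) (c : Int) (rows : List Nat) : Prop :=
  rows.length = r.toNat ∧
  ∀ i : Int, 0 ≤ i → i < r → ∀ y : Nat,
    ((PySem.List.pyGetD rows i 0).testBit y = true ↔ ((y : Int) < c ∧ cellAt P i (y : Int) = 1))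

-- overlap condition at a candidate position
def OC (board : List (List Int)) (P : List (List Int)) (bx : Int) (by_ : Int) : Prop :=
  ∃ i j : Int, 0 ≤ i ∧ i < (P.length : Int) ∧ 0 ≤ j ∧ j < (P.headI.length : Int) ∧
    cellAt P i j = 1 ∧ cellAt board (bx + i) (by_ + j) = 1

-- cells newly covered by placing P at (bx, by_)
def Cover (P : List (List Int)) (bx : Int) (by_ : Int) (x : Int) (y : Int) : Prop :=
  ∃ i j : Int, 0 ≤ i ∧ i < (P.length : Int) ∧ 0 ≤ j ∧ j < (P.headI.length : Int) ∧
    cellAt P i j = 1 ∧ x = bx + i ∧ y = by_ + j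

def GoodP (n : Int) (m : Int) (P : List (List Int)) : Prop :=
  P ≠ [] ∧ (∀ row ∈ P, P.headI.length ≤ row.length) ∧
    (P.headI.length = 0 → (P.length : Int) ≤ n ∧ 0 ≤ m)

theorem pyGet?_bridge {α : Type} (xs : List α) (i : Int) (d : α) (h0 : 0 ≤ i)
    (h1 : i < (xs.length : Int)) : PySem.List.pyGet? xs i = some (PySem.List.pyGetD xs i d) := by
  rw [PySem.List.pyGet?_eq_some_getElem xs h0 h1, PySem.List.pyGetD_eq_getElem xs d h0 h1]

theorem mapM_some {α β : Type} (l : List α) (f : α → Option β) (g : α → β)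
    (h : ∀ a ∈ l, f a = some (g a)) : l.mapM f = some (l.map g) := by
  induction l with
  | nil => simp
  | cons x xs ih =>
    simp only [List.mapM_cons, h x (by simp), List.map_cons,
      ih (fun a ha => h a (by simp [ha]))]
    rfl

theorem head_get (P : List (List Int)) (hP : P ≠ []) :
    PySem.List.pyGet? P 0 = some P.headI := by
  cases P with
  | nil => exact absurd rfl hP
  | cons h t => rw [PySem.List.pyGet?_zero_cons h t]; rfl

theorem headI_mem (l : List (List Int)) (h : l ≠ []) : l.headI ∈ l := by
  cases l with
  | nil => exact absurd rfl h
  | cons a t => simp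

theorem rotateA_some (P : List (List Int)) (hP : P ≠ [])
    (hrows : ∀ row ∈ P, P.headI.length ≤ row.length) :
    ∃ P', rotateA P = some P' ∧
      P'.length = P.headI.length ∧ (∀ row' ∈ P', row'.length = P.length) ∧
      ∀ x y : Int, 0 ≤ x → x < (P.headI.length : Int) → 0 ≤ y → y < (P.length : Int) →
        cellAt P' x y = cellAt P ((P.length : Int) - 1 - y) x := by
  have hhead : PySem.List.pyGet? P 0 = some P.headI := head_get P hP
  have hinner : ∀ x : Int, 0 ≤ x → x < (P.headI.length : Int) →
      (pyRange0 ((P.length : Int))).mapM (fun y =>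
        (PySem.List.pyGet? P ((P.length : Int) - 1 - y)).bind (fun row =>
          PySem.List.pyGet? row x)) =
      some ((pyRange0 ((P.length : Int))).map (fun y => cellAt P ((P.length : Int) - 1 - y) x)) := by
    intro x hx0 hx1
    apply mapM_some
    intro y hy
    obtain ⟨hy0, hy1⟩ := PySem.List.mem_pyRange_one.mp hy
    have hi0 : 0 ≤ (P.length : Int) - 1 - y := by omega
    have hi1 : (P.length : Int) - 1 - y < (P.length : Int) := by omega
    rw [pyGet?_bridge P _ [] hi0 hi1]
    have hlen : P.headI.length ≤ (PySem.List.pyGetD P ((P.length : Int) - 1 - y) []).length :=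
      hrows _ (PySem.List.pyGetD_mem P [] ⟨by omega, hi1⟩)
    simp only [Option.bind_some]
    exact pyGet?_bridge _ x 0 hx0 (by exact_mod_cast lt_of_lt_of_le hx1 (by exact_mod_cast hlen))
  refine ⟨(pyRange0 ((P.headI.length : Int))).map (fun x =>
      (pyRange0 ((P.length : Int))).map (fun y => cellAt P ((P.length : Int) - 1 - y) x)), ?_, ?_, ?_, ?_⟩
  · simp only [rotateA, hhead]
    apply mapM_some
    intro x hx
    obtain ⟨hx0, hx1⟩ := PySem.List.mem_pyRange_one.mp hx
    exact hinner x hx0 hx1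
  · simp [pyRange0, PySem.List.length_pyRange_one]
  · intro row' hrow'
    obtain ⟨x, _, rfl⟩ := List.mem_map.mp hrow'
    simp [pyRange0, PySem.List.length_pyRange_one]
  · intro x y hx0 hx1 hy0 hy1
    unfold cellAt
    simp only [pyRange0]
    rw [PySem.List.pyGetD_map_pyRange_of_nonneg _ _ x [] hx0 hx1]
    rw [PySem.List.pyGetD_map_pyRange_of_nonneg _ _ y 0 hy0 hy1]

theorem writeCell_some (n : Int) (m : Int) (board : List (List Int)) (hS : Shape n m board)
    (sx sy : Int) (hx0 : 0 ≤ sx) (hx1 : sx < n) (hy0 : 0 ≤ sy) (hy1 : sy < m) :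
    ∃ b', writeCell board sx sy = some b' ∧ Shape n m b' ∧
      ∀ x y : Int, 0 ≤ x → 0 ≤ y →
        cellAt b' x y = if x = sx ∧ y = sy then 1 else cellAt board x y := by
  obtain ⟨hlen, hrows⟩ := hS
  have hxlen : sx < (board.length : Int) := by rw [hlen]; omega
  have hrowmem : PySem.List.pyGetD board sx [] ∈ board :=
    PySem.List.pyGetD_mem board [] ⟨by omega, hxlen⟩
  have hrlen : (PySem.List.pyGetD board sx []).length = m.toNat := hrows _ hrowmem
  have hylen : sy.toNat < (PySem.List.pyGetD board sx []).length := by rw [hrlen]; omega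
  have hset1 : PySem.List.pySet? (PySem.List.pyGetD board sx []) sy 1 =
      some ((PySem.List.pyGetD board sx []).set sy.toNat 1) := by
    rw [show sy = ((sy.toNat : Nat) : Int) from (Int.toNat_of_nonneg hy0).symm]
    exact PySem.List.pySet?_natCast _ _ _ (by simpa using hylen)
  have hxnat : sx.toNat < board.length := by omega
  have hset2 : PySem.List.pySet? board sx ((PySem.List.pyGetD board sx []).set sy.toNat 1) =
      some (board.set sx.toNat ((PySem.List.pyGetD board sx []).set sy.toNat 1)) := by
    rw [show sx = ((sx.toNat : Nat) : Int) from (Int.toNat_of_nonneg hx0).symm]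
    exact PySem.List.pySet?_natCast _ _ _ (by simpa using hxnat)
  refine ⟨board.set sx.toNat ((PySem.List.pyGetD board sx []).set sy.toNat 1), ?_,
    ⟨by simpa using hlen, ?_⟩, ?_⟩
  · simp only [writeCell, pyGet?_bridge board sx [] hx0 hxlen, Option.bind_some, hset1, hset2]
  · intro row hrow
    rcases List.mem_or_eq_of_mem_set hrow with h | rfl
    · exact hrows _ h
    · simpa using hrlen
  · intro x y hx0' hy0'
    have hxc : x = ((x.toNat : Nat) : Int) := (Int.toNat_of_nonneg hx0').symm
    have hyc : y = ((y.toNat : Nat) : Int) := (Int.toNat_of_nonneg hy0').symm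
    unfold cellAt
    rw [show board.set sx.toNat ((PySem.List.pyGetD board sx []).set sy.toNat 1) =
        PySem.List.pySetD board ((sx.toNat : Nat) : Int)
          ((PySem.List.pyGetD board sx []).set sy.toNat 1) from
      (PySem.List.pySetD_natCast _ _ _).symm]
    rw [hxc, PySem.List.pyGetD_pySetD_natCast board _ _ _ _ hxnat]
    by_cases hxx : x.toNat = sx.toNat
    · have hxeq : x = sx := by omega
      rw [if_pos hxx]
      rw [show (PySem.List.pyGetD board sx []).set sy.toNat 1 =
          PySem.List.pySetD (PySem.List.pyGetD board sx []) ((sy.toNat : Nat) : Int) 1 from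
        (PySem.List.pySetD_natCast _ _ _).symm]
      rw [hyc, PySem.List.pyGetD_pySetD_natCast _ _ _ _ _ hylen]
      by_cases hyy : y.toNat = sy.toNat
      · rw [if_pos hyy, if_pos (show ((x.toNat : Int) = sx ∧ (y.toNat : Int) = sy) by
          constructor <;> omega)]
      · rw [if_neg hyy, if_neg (show ¬ ((x.toNat : Int) = sx ∧ (y.toNat : Int) = sy) from
          fun hh => hyy (by omega)), ← hyc, ← hxc, hxeq]
    · rw [if_neg hxx, if_neg (show ¬ ((x.toNat : Int) = sx ∧ y = sy) from
        fun hh => hxx (by omega)), ← hxc]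

theorem writeCells_some (n : Int) (m : Int) (coords : List (Int × Int)) :
    ∀ (board : List (List Int)), Shape n m board →
    (∀ p ∈ coords, 0 ≤ p.1 ∧ p.1 < n ∧ 0 ≤ p.2 ∧ p.2 < m) →
    ∃ b', writeCells board coords = some b' ∧ Shape n m b' ∧
      ∀ x y : Int, 0 ≤ x → 0 ≤ y →
        cellAt b' x y = if (x, y) ∈ coords then 1 else cellAt board x y := by
  induction coords with
  | nil => intro board hS _; exact ⟨board, rfl, hS, by simp⟩
  | cons p rest ih =>
    intro board hS hb
    obtain ⟨h1, h2, h3, h4⟩ := hb p (by simp)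
    obtain ⟨b1, hb1, hS1, hc1⟩ := writeCell_some n m board hS p.1 p.2 h1 h2 h3 h4
    obtain ⟨b', hb', hS', hc'⟩ := ih b1 hS1 (fun q hq => hb q (by simp [hq]))
    refine ⟨b', ?_, hS', ?_⟩
    · obtain ⟨px, py⟩ := p
      simp only [writeCells, hb1, Option.bind_some, hb']
    · intro x y hx hy
      rw [hc' x y hx hy, hc1 x y hx hy]
      by_cases hmem : (x, y) ∈ rest
      · simp [hmem]
      · by_cases hp : (x, y) = p
        · obtain ⟨px, py⟩ := p
          simp_all
        · have : ¬ (x = p.1 ∧ y = p.2) := by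
            rintro ⟨rfl, rfl⟩; exact hp rfl
          simp [hmem, hp, this]

theorem stickScanRow_spec (n : Int) (m : Int) (board : List (List Int)) (P : List (List Int))
    (bx : Int) (by_ : Int) (i : Int) (hS : Shape n m board)
    (hi : 0 ≤ i ∧ i < (P.length : Int)) (hbi : 0 ≤ bx + i ∧ bx + i < n)
    (js : List Int)
    (hjs : ∀ j ∈ js, 0 ≤ j ∧ j < ((PySem.List.pyGetD P i []).length : Int) ∧
      0 ≤ by_ + j ∧ by_ + j < m) :
    ∀ acc : List (Int × Int),
    ((∃ j ∈ js, cellAt P i j = 1 ∧ cellAt board (bx + i) (by_ + j) = 1) →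
      stickScanRow board P bx by_ i js acc = some none) ∧
    ((∀ j ∈ js, cellAt P i j = 1 → cellAt board (bx + i) (by_ + j) ≠ 1) →
      stickScanRow board P bx by_ i js acc = some (some (acc ++
        (js.filter (fun j => decide (cellAt P i j = 1))).map (fun j => (bx + i, by_ + j))))) := by
  induction js with
  | nil =>
    intro acc
    constructor
    · rintro ⟨j, hj, _⟩
      cases hj
    · intro _
      simp [stickScanRow]
  | cons j js' ih =>
    intro acc
    obtain ⟨hj0, hj1, hj2, hj3⟩ := hjs j (by simp)
    have hPrd : PySem.List.pyGet? P i = some (PySem.List.pyGetD P i []) :=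
      pyGet?_bridge P i [] hi.1 hi.2
    have hv : PySem.List.pyGet? (PySem.List.pyGetD P i []) j = some (cellAt P i j) :=
      pyGet?_bridge _ j 0 hj0 hj1
    have hblen : (board.length : Int) = n := by rw [hS.1]; omega
    have hbrow : PySem.List.pyGet? board (bx + i) =
        some (PySem.List.pyGetD board (bx + i) []) :=
      pyGet?_bridge board (bx + i) [] hbi.1 (by omega)
    have hrl : ((PySem.List.pyGetD board (bx + i) []).length : Int) = m := by
      have := hS.2 _ (PySem.List.pyGetD_mem board (i := bx + i) [] ⟨by omega, by omega⟩)
      rw [this]; omega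
    have hbv : PySem.List.pyGet? (PySem.List.pyGetD board (bx + i) []) (by_ + j) =
        some (cellAt board (bx + i) (by_ + j)) :=
      pyGet?_bridge (PySem.List.pyGetD board (bx + i) []) (by_ + j) 0 hj2 (by omega)
    have ihs := ih (fun a ha => hjs a (by simp [ha]))
    have hstep : stickScanRow board P bx by_ i (j :: js') acc =
        if cellAt P i j = 1 then
          (if cellAt board (bx + i) (by_ + j) = 1 then some none
           else stickScanRow board P bx by_ i js' (acc ++ [(bx + i, by_ + j)]))
        else stickScanRow board P bx by_ i js' acc := by
      simp only [stickScanRow, hPrd, Option.bind_some, hv, hbrow, hbv]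
      by_cases hcv : cellAt P i j = 1 <;> simp [hcv]
    constructor
    · rintro ⟨j', hj', h1, h2⟩
      rw [hstep]
      rcases List.mem_cons.mp hj' with rfl | hj'
      · rw [if_pos h1, if_pos h2]
      · by_cases hcv : cellAt P i j = 1
        · rw [if_pos hcv]
          by_cases hb : cellAt board (bx + i) (by_ + j) = 1
          · rw [if_pos hb]
          · rw [if_neg hb]
            exact (ihs _).1 ⟨j', hj', h1, h2⟩
        · rw [if_neg hcv]
          exact (ihs _).1 ⟨j', hj', h1, h2⟩
    · intro hall
      rw [hstep]
      by_cases hcv : cellAt P i j = 1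
      · rw [if_pos hcv, if_neg (hall j (by simp) hcv)]
        rw [(ihs _).2 (fun a ha hc => hall a (by simp [ha]) hc)]
        simp [hcv, List.append_assoc]
      · rw [if_neg hcv]
        rw [(ihs _).2 (fun a ha hc => hall a (by simp [ha]) hc)]
        simp [hcv]

theorem stickScan_spec (n : Int) (m : Int) (board : List (List Int)) (P : List (List Int))
    (bx : Int) (by_ : Int) (c : Int) (hS : Shape n m board)
    (hc : ∀ row ∈ P, c ≤ (row.length : Int)) (hby : 0 ≤ by_ ∧ by_ + c ≤ m)
    (is : List Int)
    (his : ∀ i ∈ is, 0 ≤ i ∧ i < (P.length : Int) ∧ 0 ≤ bx + i ∧ bx + i < n) :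
    ∀ acc : List (Int × Int),
    ((∃ i ∈ is, ∃ j : Int, 0 ≤ j ∧ j < c ∧ cellAt P i j = 1 ∧
        cellAt board (bx + i) (by_ + j) = 1) →
      stickScan board P bx by_ is c acc = some none) ∧
    ((∀ i ∈ is, ∀ j : Int, 0 ≤ j → j < c → cellAt P i j = 1 →
        cellAt board (bx + i) (by_ + j) ≠ 1) →
      stickScan board P bx by_ is c acc = some (some (acc ++ is.flatMap (fun i =>
        (((pyRange0 c).filter (fun j => decide (cellAt P i j = 1))).map
          (fun j => (bx + i, by_ + j))))))) := by
  induction is with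
  | nil =>
    intro acc
    constructor
    · rintro ⟨i, hi, _⟩
      cases hi
    · intro _
      simp [stickScan]
  | cons i is' ih =>
    intro acc
    obtain ⟨hi0, hi1, hi2, hi3⟩ := his i (by simp)
    have hrow := stickScanRow_spec n m board P bx by_ i hS ⟨hi0, hi1⟩ ⟨hi2, hi3⟩
      (pyRange0 c) (fun j hj => by
        obtain ⟨hj0, hjc⟩ := PySem.List.mem_pyRange_one.mp hj
        have hl : c ≤ ((PySem.List.pyGetD P i []).length : Int) :=
          hc _ (PySem.List.pyGetD_mem P [] ⟨by omega, hi1⟩)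
        exact ⟨hj0, by omega, by omega, by omega⟩)
    have ihs := ih (fun a ha => his a (by simp [ha]))
    constructor
    · rintro ⟨i', hi', j, hjp⟩
      rcases List.mem_cons.mp hi' with rfl | hi'
      · have : stickScanRow board P bx by_ i' (pyRange0 c) acc = some none :=
          (hrow acc).1 ⟨j, PySem.List.mem_pyRange_one.mpr ⟨hjp.1, hjp.2.1⟩, hjp.2.2.1, hjp.2.2.2⟩
        simp [stickScan, this]
      · by_cases hcol : ∃ j' ∈ pyRange0 c, cellAt P i j' = 1 ∧
            cellAt board (bx + i) (by_ + j') = 1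
        · have := (hrow acc).1 hcol
          simp [stickScan, this]
        · have hall : ∀ j' ∈ pyRange0 c, cellAt P i j' = 1 →
              cellAt board (bx + i) (by_ + j') ≠ 1 := by
            intro j' hj' h1 h2
            exact hcol ⟨j', hj', h1, h2⟩
          have := (hrow acc).2 hall
          simp only [stickScan, this]
          exact (ihs _).1 ⟨i', hi', j, hjp⟩
    · intro hall
      have hrowall : ∀ j' ∈ pyRange0 c, cellAt P i j' = 1 →
          cellAt board (bx + i) (by_ + j') ≠ 1 := by
        intro j' hj' h1
        obtain ⟨a, b⟩ := PySem.List.mem_pyRange_one.mp hj'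
        exact hall i (by simp) j' a b h1
      have hr := (hrow acc).2 hrowall
      simp only [stickScan, hr]
      rw [(ihs _).2 (fun a ha => hall a (by simp [ha]))]
      simp [List.flatMap_cons, List.append_assoc]

-- A-side: outcome of stick at one candidate position, in terms of OC / Cover
theorem stickA_spec (n : Int) (m : Int) (board : List (List Int)) (P : List (List Int))
    (hS : Shape n m board)
    (hP : P ≠ []) (hrows : ∀ row ∈ P, P.headI.length ≤ row.length)
    (bx : Int) (by_ : Int)
    (hbx : 0 ≤ bx ∧ bx + (P.length : Int) ≤ n)
    (hby : 0 ≤ by_ ∧ by_ + (P.headI.length : Int) ≤ m) :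
    (OC board P bx by_ → stickA board P bx by_ = some (false, board)) ∧
    (¬ OC board P bx by_ → ∃ b', stickA board P bx by_ = some (true, b') ∧ Shape n m b' ∧
      ∀ x y : Int, 0 ≤ x → 0 ≤ y →
        (cellAt b' x y = 1 ↔ (Cover P bx by_ x y ∨ cellAt board x y = 1))) := by
  have hhead := head_get P hP
  have hscan := stickScan_spec n m board P bx by_ ((P.headI.length : Int)) hS
    (fun row hr => by exact_mod_cast hrows row hr) ⟨hby.1, hby.2⟩
    (pyRange0 ((P.length : Int)))
    (fun i hi => by
      obtain ⟨a, b⟩ := PySem.List.mem_pyRange_one.mp hi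
      exact ⟨a, b, by omega, by omega⟩)
  have hOCiff : (∃ i ∈ pyRange0 ((P.length : Int)), ∃ j : Int, 0 ≤ j ∧
      j < (P.headI.length : Int) ∧ cellAt P i j = 1 ∧
      cellAt board (bx + i) (by_ + j) = 1) ↔ OC board P bx by_ := by
    constructor
    · rintro ⟨i, hi, j, hj0, hj1, h1, h2⟩
      obtain ⟨a, b⟩ := PySem.List.mem_pyRange_one.mp hi
      exact ⟨i, j, a, b, hj0, hj1, h1, h2⟩
    · rintro ⟨i, j, a, b, c', d, h1, h2⟩
      exact ⟨i, PySem.List.mem_pyRange_one.mpr ⟨a, b⟩, j, c', d, h1, h2⟩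
  constructor
  · intro hoc
    have hcol := (hscan []).1 (hOCiff.mpr hoc)
    simp only [stickA, hhead, hcol]
  · intro hnoc
    have hall : ∀ i ∈ pyRange0 ((P.length : Int)), ∀ j : Int, 0 ≤ j →
        j < (P.headI.length : Int) → cellAt P i j = 1 →
        cellAt board (bx + i) (by_ + j) ≠ 1 := by
      intro i hi j hj0 hj1 h1 h2
      exact hnoc (hOCiff.mp ⟨i, hi, j, hj0, hj1, h1, h2⟩)
    have hscanval := (hscan []).2 hall
    set coords := (pyRange0 ((P.length : Int))).flatMap (fun i =>
      (((pyRange0 ((P.headI.length : Int))).filter (fun j => decide (cellAt P i j = 1))).map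
        (fun j => (bx + i, by_ + j)))) with hcoords_def
    have hcoordmem : ∀ x y : Int, ((x, y) ∈ coords ↔ Cover P bx by_ x y) := by
      intro x y
      constructor
      · intro hm
        obtain ⟨i, hi, hm2⟩ := List.mem_flatMap.mp hm
        obtain ⟨j, hjf, heq⟩ := List.mem_map.mp hm2
        obtain ⟨hjr, hjd⟩ := List.mem_filter.mp hjf
        obtain ⟨a, b⟩ := PySem.List.mem_pyRange_one.mp hi
        obtain ⟨c', d⟩ := PySem.List.mem_pyRange_one.mp hjr
        rw [Prod.ext_iff] at heq
        exact ⟨i, j, a, b, c', d, of_decide_eq_true hjd, heq.1.symm, heq.2.symm⟩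
      · rintro ⟨i, j, a, b, c', d, h1, rfl, rfl⟩
        refine List.mem_flatMap.mpr ⟨i, PySem.List.mem_pyRange_one.mpr ⟨a, b⟩, ?_⟩
        exact List.mem_map.mpr ⟨j, List.mem_filter.mpr
          ⟨PySem.List.mem_pyRange_one.mpr ⟨c', d⟩, decide_eq_true h1⟩, rfl⟩
    obtain ⟨b', hwc, hS', hcell⟩ := writeCells_some n m coords board hS (by
      intro p hp
      obtain ⟨i, j, a, b, c', d, _, h6, h7⟩ := (hcoordmem p.1 p.2).mp
        (by rwa [← Prod.mk.eta (p := p)] at hp)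
      refine ⟨by omega, by omega, by omega, by omega⟩)
    refine ⟨b', ?_, hS', ?_⟩
    · simp only [stickA, hhead, hscanval, List.nil_append, hwc, Option.map_some]
    · intro x y hx hy
      rw [hcell x y hx hy]
      by_cases hcm : (x, y) ∈ coords
      · rw [if_pos hcm]
        exact ⟨fun _ => Or.inl ((hcoordmem x y).mp hcm), fun _ => rfl⟩
      · rw [if_neg hcm]
        constructor
        · intro hh
          exact Or.inr hh
        · rintro (hcov | hh)
          · exact absurd ((hcoordmem x y).mpr hcov) hcm
          · exact hh

-- ===== bit-level toolkit =====

theorem tb_one (i : Nat) : (1 : Nat).testBit i = decide (i = 0) := by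
  cases i with
  | zero => decide
  | succ k => simp [Nat.testBit_succ]

theorem stripe_unique (i m u j v : Nat) (hm : 0 < m) (hu : u < m) (hv : v < m)
    (h : i * m + u = j * m + v) : i = j ∧ u = v := by
  have d1 : (i * m + u) / m = i := by
    rw [Nat.mul_comm, Nat.mul_add_div hm, Nat.div_eq_of_lt hu]; omega
  have d2 : (j * m + v) / m = j := by
    rw [Nat.mul_comm, Nat.mul_add_div hm, Nat.div_eq_of_lt hv]; omega
  have hij : i = j := by rw [← d1, ← d2, h]
  subst hij
  exact ⟨rfl, by omega⟩

theorem testBit_foldl_or {α : Type} (l : List α) (f : α → Nat) (t : Nat) :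
    ∀ init : Nat, ((l.foldl (fun acc a => acc ||| f a) init).testBit t) =
      (init.testBit t || l.any (fun a => (f a).testBit t)) := by
  induction l with
  | nil => intro init; simp
  | cons a l ih =>
    intro init
    simp only [List.foldl_cons, ih, Nat.testBit_or, List.any_cons]
    rw [Bool.or_assoc]

theorem eq_zero_iff_testBit (w : Nat) : w = 0 ↔ ∀ t, w.testBit t = false := by
  constructor
  · rintro rfl t; exact Nat.zero_testBit t
  · intro h; exact Nat.eq_of_testBit_eq (fun t => by rw [h t, Nat.zero_testBit])

theorem packStripes_testBit (g : Int → Nat) (m : Int) (k : Int) (t : Nat) :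
    (packStripes g m k).testBit t =
      (pyRange0 k).any (fun i => (g i <<< (i * m).toNat).testBit t) := by
  unfold packStripes
  rw [testBit_foldl_or, Nat.zero_testBit, Bool.false_or]

theorem rowMaskB_testBit (row : List Int) (c : Int) (y : Nat) :
    (rowMaskB row c).testBit y = true ↔
      ((y : Int) < c ∧ PySem.List.pyGetD row ((y : Int)) 0 = 1) := by
  unfold rowMaskB
  rw [PySem.List.foldl_congr_mem (pyRange0 c) _ (fun mask j =>
    mask ||| (if PySem.List.pyGetD row j 0 = 1 then (1 : Nat) <<< j.toNat else 0)) 0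
    (by intro acc x _; by_cases h : PySem.List.pyGetD row x 0 = 1 <;> simp [h])]
  rw [testBit_foldl_or, Nat.zero_testBit, Bool.false_or, List.any_eq_true]
  constructor
  · rintro ⟨j, hj, hbit⟩
    obtain ⟨hj0, hjc⟩ := PySem.List.mem_pyRange_one.mp hj
    by_cases h : PySem.List.pyGetD row j 0 = 1
    · rw [if_pos h, Nat.testBit_shiftLeft] at hbit
      have h2 := Bool.and_eq_true_iff.mp hbit
      rw [tb_one] at h2
      have hle : j.toNat ≤ y := of_decide_eq_true h2.1
      have heq : y - j.toNat = 0 := of_decide_eq_true h2.2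
      have hy : (y : Int) = j := by omega
      rw [hy]
      exact ⟨hjc, h⟩
    · rw [if_neg h] at hbit
      rw [Nat.zero_testBit] at hbit
      exact absurd hbit (by simp)
  · rintro ⟨hyc, hval⟩
    refine ⟨(y : Int), PySem.List.mem_pyRange_one.mpr ⟨by positivity, hyc⟩, ?_⟩
    rw [if_pos hval, Nat.testBit_shiftLeft]
    simp

theorem colMaskB_testBit (rows : List Nat) (r : Int) (x : Int) (y : Nat) :
    (colMaskB rows r x).testBit y = true ↔
      ((y : Int) < r ∧ (PySem.List.pyGetD rows (r - 1 - (y : Int)) 0).testBit x.toNat = true) := by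
  unfold colMaskB
  rw [testBit_foldl_or, Nat.zero_testBit, Bool.false_or, List.any_eq_true]
  constructor
  · rintro ⟨y', hy', hbit⟩
    obtain ⟨hy0, hyr⟩ := PySem.List.mem_pyRange_one.mp hy'
    rw [Nat.testBit_shiftLeft] at hbit
    have h2 := Bool.and_eq_true_iff.mp hbit
    have hle : y'.toNat ≤ y := of_decide_eq_true h2.1
    have hb := h2.2
    rw [Nat.testBit_and, tb_one] at hb
    have h3 := Bool.and_eq_true_iff.mp hb
    have heq : y - y'.toNat = 0 := of_decide_eq_true h3.2
    have hy : (y : Int) = y' := by omega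
    rw [Nat.testBit_shiftRight] at h3
    have h4 := h3.1
    rw [heq] at h4
    rw [Nat.add_zero] at h4
    rw [hy]
    exact ⟨hyr, h4⟩
  · rintro ⟨hyr, hbit⟩
    refine ⟨(y : Int), PySem.List.mem_pyRange_one.mpr ⟨by positivity, hyr⟩, ?_⟩
    rw [Nat.testBit_shiftLeft]
    simp only [Int.toNat_natCast, Nat.le_refl, decide_true, Nat.sub_self, Bool.true_and]
    rw [Nat.testBit_and, Nat.testBit_shiftRight, tb_one]
    simp [hbit]

-- fit test ⟺ no overlap
theorem and_one_testBit (v k : Nat) : (v >>> k) &&& 1 = if v.testBit k then 1 else 0 := by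
  rw [Nat.and_one_is_mod, Nat.testBit, Nat.one_and_eq_mod_two]
  rcases Nat.mod_two_eq_zero_or_one (v >>> k) with h | h <;> simp [h]

theorem getD_zero_headI (p : List (List Int)) (hP : p ≠ []) :
    PySem.List.pyGetD p 0 [] = p.headI := by
  cases p with
  | nil => exact absurd rfl hP
  | cons a t => rw [PySem.List.pyGetD_ofNat']; rfl

theorem pyGetD_pySetD_int (xs : List Nat) (i x : Int) (v : Nat) (hi0 : 0 ≤ i)
    (hi : i < (xs.length : Int)) (hx0 : 0 ≤ x) :
    PySem.List.pyGetD (PySem.List.pySetD xs i v) x 0 =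
      if x = i then v else PySem.List.pyGetD xs x 0 := by
  rw [show i = ((i.toNat : Nat) : Int) from by omega, show x = ((x.toNat : Nat) : Int) from by omega,
    PySem.List.pyGetD_pySetD_natCast _ _ _ _ _ (by omega)]
  by_cases h : x.toNat = i.toNat
  · rw [if_pos h, if_pos (by omega)]
  · rw [if_neg h, if_neg (by omega)]

theorem placeRows_nat (board rows : List Nat) (bx by_ : Int) (hbx : 0 ≤ bx) (k : Nat)
    (hk : bx + (k : Int) ≤ (board.length : Int)) :
    (placeRows board rows bx by_ ((k : Int))).length = board.length ∧
    ∀ x : Int, 0 ≤ x → x < (board.length : Int) →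
      PySem.List.pyGetD (placeRows board rows bx by_ ((k : Int))) x 0 =
        if bx ≤ x ∧ x < bx + (k : Int) then
          (PySem.List.pyGetD board x 0) ||| ((PySem.List.pyGetD rows (x - bx) 0) <<< by_.toNat)
        else PySem.List.pyGetD board x 0 := by
  induction k with
  | zero =>
    have hnil : pyRange0 ((0 : Nat) : Int) = [] := PySem.List.pyRange_one_eq_nil (by simp)
    constructor
    · unfold placeRows
      rw [hnil, List.foldl_nil]
    · intro x hx0 hx1
      unfold placeRows
      rw [hnil, List.foldl_nil, if_neg (by omega)]
  | succ k ih =>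
    have hk' : bx + (k : Int) ≤ (board.length : Int) := by push_cast at hk ⊢; omega
    obtain ⟨ihlen, ihget⟩ := ih hk'
    have hsplit : pyRange0 (((k + 1 : Nat)) : Int) = pyRange0 ((k : Int)) ++ [((k : Int))] := by
      show PySem.List.pyRange 0 _ 1 = PySem.List.pyRange 0 _ 1 ++ _
      push_cast
      exact PySem.List.pyRange_one_succ_right (by positivity)
    have hfold : placeRows board rows bx by_ (((k + 1 : Nat)) : Int) =
        PySem.List.pySetD (placeRows board rows bx by_ ((k : Int))) (bx + (k : Int))
          ((PySem.List.pyGetD (placeRows board rows bx by_ ((k : Int))) (bx + (k : Int)) 0) |||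
            ((PySem.List.pyGetD rows ((k : Int)) 0) <<< by_.toNat)) := by
      unfold placeRows
      rw [hsplit, List.foldl_append, List.foldl_cons, List.foldl_nil]
    set L := placeRows board rows bx by_ ((k : Int)) with hL
    have hbk0 : (0 : Int) ≤ bx + (k : Int) := by omega
    have hbk1 : bx + (k : Int) < (board.length : Int) := by push_cast at hk; omega
    have hLk : PySem.List.pyGetD L (bx + (k : Int)) 0 = PySem.List.pyGetD board (bx + (k : Int)) 0 := by
      rw [ihget _ hbk0 hbk1, if_neg (by omega)]
    constructor
    · rw [hfold, PySem.List.length_pySetD, ihlen]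
    · intro x hx0 hx1
      rw [hfold, hLk, pyGetD_pySetD_int L (bx + (k : Int)) x _ hbk0 (by rw [ihlen]; omega) hx0]
      by_cases hxk : x = bx + (k : Int)
      · rw [if_pos hxk, if_pos (by push_cast; omega)]
        subst hxk
        rw [show bx + (k : Int) - bx = (k : Int) from by omega]
      · rw [if_neg hxk, ihget x hx0 hx1]
        by_cases hin : bx ≤ x ∧ x < bx + (k : Int)
        · rw [if_pos hin, if_pos (by push_cast; omega)]
        · rw [if_neg hin, if_neg (by push_cast; omega)]

theorem placeRows_spec (board : List Nat) (rows : List Nat) (bx : Int) (by_ : Int) (r : Int)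
    (hbx : 0 ≤ bx ∧ bx + r ≤ (board.length : Int)) :
    (placeRows board rows bx by_ r).length = board.length ∧
    ∀ x : Int, 0 ≤ x → x < (board.length : Int) →
      PySem.List.pyGetD (placeRows board rows bx by_ r) x 0 =
        if bx ≤ x ∧ x < bx + r then
          (PySem.List.pyGetD board x 0) ||| ((PySem.List.pyGetD rows (x - bx) 0) <<< by_.toNat)
        else PySem.List.pyGetD board x 0 := by
  by_cases hr : 0 ≤ r
  · have h := placeRows_nat board rows bx by_ hbx.1 r.toNat (by omega)
    rw [Int.toNat_of_nonneg hr] at h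
    exact h
  · have hnil : pyRange0 r = [] := PySem.List.pyRange_one_eq_nil (by omega)
    constructor
    · unfold placeRows; rw [hnil, List.foldl_nil]
    · intro x hx0 hx1
      unfold placeRows
      rw [hnil, List.foldl_nil, if_neg (by omega)]
theorem fit_iff (n : Int) (m : Int) (board : List (List Int)) (P : List (List Int))
    (masks : List Nat) (rows : List Nat)
    (hM : MRel n m board masks)
    (hR : RSpec P ((P.length : Int)) ((P.headI.length : Int)) rows)
    (bx : Int) (by_ : Int)
    (hbx : 0 ≤ bx ∧ bx + (P.length : Int) ≤ n)
    (hby : 0 ≤ by_ ∧ by_ + (P.headI.length : Int) ≤ m) :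
    ((packStripes (fun i => PySem.List.pyGetD masks (bx + i) 0) m ((P.length : Int))) &&&
      ((packStripes (fun i => PySem.List.pyGetD rows i 0) m ((P.length : Int))) <<< by_.toNat) = 0)
    ↔ ¬ OC board P bx by_ := by
  obtain ⟨hS, hmlen, hmbit⟩ := hM
  obtain ⟨hrlen, hrbit⟩ := hR
  by_cases hc0 : P.headI.length = 0
  · have hOC : ¬ OC board P bx by_ := by
      rintro ⟨i, j, _, _, hj0, hj1, _, _⟩
      rw [hc0] at hj1
      simp at hj1
      omega
    have hpp : packStripes (fun i => PySem.List.pyGetD rows i 0) m ((P.length : Int)) = 0 := by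
      rw [eq_zero_iff_testBit]
      intro t
      rw [packStripes_testBit, List.any_eq_false]
      intro i hi
      obtain ⟨h0, h1⟩ := PySem.List.mem_pyRange_one.mp hi
      have hz : PySem.List.pyGetD rows i 0 = 0 := by
        rw [eq_zero_iff_testBit]
        intro u
        by_contra hb
        have hbt : (PySem.List.pyGetD rows i 0).testBit u = true := by
          cases h : (PySem.List.pyGetD rows i 0).testBit u
          · exact absurd h hb
          · rfl
        have := (hrbit i h0 h1 u).mp hbt
        rw [hc0] at this
        simp at this
        omega
      rw [hz, Nat.zero_shiftLeft, Nat.zero_testBit]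
      simp
    rw [hpp, Nat.zero_shiftLeft, Nat.and_zero]
    simp [hOC]
  · have hc1 : 1 ≤ (P.headI.length : Int) := by
      have := Nat.one_le_iff_ne_zero.mpr hc0
      exact_mod_cast this
    have hm1 : 0 < m := by omega
    set mN := m.toNat with hmNdef
    have hmc : m = (mN : Int) := by omega
    have hw : ∀ t : Nat,
        ((packStripes (fun i => PySem.List.pyGetD masks (bx + i) 0) m ((P.length : Int))).testBit t = true) ↔
        ∃ i : Int, 0 ≤ i ∧ i < (P.length : Int) ∧ ∃ u : Nat, u < mN ∧ t = i.toNat * mN + u ∧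
          cellAt board (bx + i) ((u : Int)) = 1 := by
      intro t
      rw [packStripes_testBit, List.any_eq_true]
      constructor
      · rintro ⟨i, hi, hbit⟩
        obtain ⟨h0, h1⟩ := PySem.List.mem_pyRange_one.mp hi
        rw [Nat.testBit_shiftLeft] at hbit
        obtain ⟨hge, hbit2⟩ := Bool.and_eq_true_iff.mp hbit
        have hge' : (i * m).toNat ≤ t := of_decide_eq_true hge
        have hmul : (i * m).toNat = i.toNat * mN := Int.toNat_mul h0 (by omega)
        obtain ⟨hum, hcell⟩ := (hmbit (bx + i) (by omega) (by omega) (t - (i * m).toNat)).mp hbit2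
        exact ⟨i, h0, h1, t - (i * m).toNat, by omega, by omega, hcell⟩
      · rintro ⟨i, h0, h1, u, hum, ht, hcell⟩
        refine ⟨i, PySem.List.mem_pyRange_one.mpr ⟨h0, h1⟩, ?_⟩
        rw [Nat.testBit_shiftLeft]
        have hmul : (i * m).toNat = i.toNat * mN := Int.toNat_mul h0 (by omega)
        apply Bool.and_eq_true_iff.mpr
        refine ⟨decide_eq_true (by omega), ?_⟩
        rw [show t - (i * m).toNat = u from by omega]
        exact (hmbit (bx + i) (by omega) (by omega) u).mpr ⟨by omega, hcell⟩
    have hs : ∀ t : Nat,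
        (((packStripes (fun i => PySem.List.pyGetD rows i 0) m ((P.length : Int))) <<< by_.toNat).testBit t = true) ↔
        ∃ i : Int, 0 ≤ i ∧ i < (P.length : Int) ∧ ∃ v : Nat, ((v : Int)) < (P.headI.length : Int) ∧
          t = i.toNat * mN + (by_.toNat + v) ∧ cellAt P i ((v : Int)) = 1 := by
      intro t
      rw [Nat.testBit_shiftLeft]
      constructor
      · intro hbit
        obtain ⟨hge, hbit2⟩ := Bool.and_eq_true_iff.mp hbit
        have hge' : by_.toNat ≤ t := of_decide_eq_true hge
        rw [packStripes_testBit, List.any_eq_true] at hbit2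
        obtain ⟨i, hi, hbit3⟩ := hbit2
        obtain ⟨h0, h1⟩ := PySem.List.mem_pyRange_one.mp hi
        rw [Nat.testBit_shiftLeft] at hbit3
        obtain ⟨hge2, hbit4⟩ := Bool.and_eq_true_iff.mp hbit3
        have hge2' : (i * m).toNat ≤ t - by_.toNat := of_decide_eq_true hge2
        have hmul : (i * m).toNat = i.toNat * mN := Int.toNat_mul h0 (by omega)
        obtain ⟨hvc, hcell⟩ := (hrbit i h0 h1 (t - by_.toNat - (i * m).toNat)).mp hbit4
        exact ⟨i, h0, h1, t - by_.toNat - (i * m).toNat, hvc, by omega, hcell⟩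
      · rintro ⟨i, h0, h1, v, hvc, ht, hcell⟩
        apply Bool.and_eq_true_iff.mpr
        refine ⟨decide_eq_true (by omega), ?_⟩
        rw [packStripes_testBit, List.any_eq_true]
        refine ⟨i, PySem.List.mem_pyRange_one.mpr ⟨h0, h1⟩, ?_⟩
        rw [Nat.testBit_shiftLeft]
        have hmul : (i * m).toNat = i.toNat * mN := Int.toNat_mul h0 (by omega)
        apply Bool.and_eq_true_iff.mpr
        refine ⟨decide_eq_true (by omega), ?_⟩
        rw [show t - by_.toNat - (i * m).toNat = v from by omega]
        exact (hrbit i h0 h1 v).mpr ⟨hvc, hcell⟩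
    constructor
    · intro h0 hoc
      obtain ⟨i, j, hi0, hi1, hj0, hj1, hp1, hb1⟩ := hoc
      set t := i.toNat * mN + (by_.toNat + j.toNat) with htdef
      have hwb := (hw t).mpr ⟨i, hi0, hi1, by_.toNat + j.toNat, by omega, rfl, by
        rw [show ((by_.toNat + j.toNat : Nat) : Int) = by_ + j from by omega]
        exact hb1⟩
      have hsb := (hs t).mpr ⟨i, hi0, hi1, j.toNat, by omega, rfl, by
        rw [show ((j.toNat : Nat) : Int) = j from by omega]
        exact hp1⟩
      have hb : ((packStripes (fun i => PySem.List.pyGetD masks (bx + i) 0) m ((P.length : Int))) &&&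
          ((packStripes (fun i => PySem.List.pyGetD rows i 0) m ((P.length : Int))) <<< by_.toNat)).testBit t = true := by
        rw [Nat.testBit_and, hwb, hsb]
        rfl
      rw [h0, Nat.zero_testBit] at hb
      exact absurd hb (by simp)
    · intro hnoc
      rw [eq_zero_iff_testBit]
      intro t
      rw [Nat.testBit_and]
      cases hwb : (packStripes (fun i => PySem.List.pyGetD masks (bx + i) 0) m ((P.length : Int))).testBit t
      · simp
      · cases hsb : ((packStripes (fun i => PySem.List.pyGetD rows i 0) m ((P.length : Int))) <<< by_.toNat).testBit t
        · simp
        · exfalso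
          obtain ⟨i, hi0, hi1, u, hum, htu, hbc⟩ := (hw t).mp hwb
          obtain ⟨i', hi0', hi1', v, hvc, htv, hpc⟩ := (hs t).mp hsb
          have huB : by_.toNat + v < mN := by omega
          obtain ⟨hii, huv⟩ := stripe_unique i.toNat mN u i'.toNat (by_.toNat + v)
            (by omega) hum huB (by omega)
          apply hnoc
          refine ⟨i, ((v : Int)), hi0, hi1, by positivity, hvc, ?_, ?_⟩
          · rw [show i = i' from by omega]
            exact hpc
          · rw [show by_ + ((v : Int)) = ((u : Nat) : Int) from by omega]
            exact hbc

theorem place_MRel (n : Int) (m : Int) (board b' : List (List Int)) (P : List (List Int))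
    (masks rows : List Nat) (bx : Int) (by_ : Int)
    (hM : MRel n m board masks)
    (hR : RSpec P ((P.length : Int)) ((P.headI.length : Int)) rows)
    (hbx : 0 ≤ bx ∧ bx + (P.length : Int) ≤ n)
    (hby : 0 ≤ by_ ∧ by_ + (P.headI.length : Int) ≤ m)
    (hS' : Shape n m b')
    (hcell : ∀ x y : Int, 0 ≤ x → 0 ≤ y →
      (cellAt b' x y = 1 ↔ (Cover P bx by_ x y ∨ cellAt board x y = 1))) :
    MRel n m b' (placeRows masks rows bx by_ ((P.length : Int))) := by
  obtain ⟨hS, hmlen, hmbit⟩ := hM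
  obtain ⟨hrlen, hrbit⟩ := hR
  have hn0 : 0 ≤ n := by
    have : (0 : Int) ≤ (P.length : Int) := by positivity
    omega
  obtain ⟨hplen, hpget⟩ := placeRows_spec masks rows bx by_ ((P.length : Int))
    ⟨hbx.1, by omega⟩
  refine ⟨hS', by omega, ?_⟩
  intro x hx0 hx1 y
  rw [hpget x hx0 (by omega)]
  have hcell' := hcell x ((y : Int)) hx0 (by positivity)
  by_cases hin : bx ≤ x ∧ x < bx + (P.length : Int)
  · rw [if_pos hin]
    rw [Nat.testBit_or, Nat.testBit_shiftLeft]
    constructor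
    · intro hb
      rcases Bool.or_eq_true_iff.mp hb with hb | hb
      · obtain ⟨hym, hc⟩ := (hmbit x hx0 hx1 y).mp hb
        exact ⟨hym, hcell'.mpr (Or.inr hc)⟩
      · obtain ⟨hge, hb2⟩ := Bool.and_eq_true_iff.mp hb
        have hge' : by_.toNat ≤ y := of_decide_eq_true hge
        obtain ⟨hvc, hpc⟩ := (hrbit (x - bx) (by omega) (by omega) (y - by_.toNat)).mp hb2
        have hym : (y : Int) < m := by omega
        refine ⟨hym, hcell'.mpr (Or.inl ⟨x - bx, (((y - by_.toNat : Nat)) : Int),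
          by omega, by omega, by positivity, hvc, hpc, by omega, by omega⟩)⟩
    · rintro ⟨hym, hb1⟩
      rcases hcell'.mp hb1 with hcov | hold
      · obtain ⟨i, j, hi0, hi1, hj0, hj1, hp1, hxe, hye⟩ := hcov
        apply Bool.or_eq_true_iff.mpr
        right
        apply Bool.and_eq_true_iff.mpr
        refine ⟨decide_eq_true (by omega), ?_⟩
        rw [show y - by_.toNat = j.toNat from by omega]
        apply (hrbit (x - bx) (by omega) (by omega) j.toNat).mpr
        rw [show ((j.toNat : Nat) : Int) = j from by omega, show x - bx = i from by omega]
        exact ⟨by omega, hp1⟩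
      · apply Bool.or_eq_true_iff.mpr
        left
        exact (hmbit x hx0 hx1 y).mpr ⟨hym, hold⟩
  · rw [if_neg hin]
    rw [hmbit x hx0 hx1 y]
    constructor
    · rintro ⟨hym, hold⟩
      exact ⟨hym, hcell'.mpr (Or.inr hold)⟩
    · rintro ⟨hym, hb1⟩
      rcases hcell'.mp hb1 with hcov | hold
      · obtain ⟨i, j, hi0, hi1, _, _, _, hxe, _⟩ := hcov
        exact absurd (show bx ≤ x ∧ x < bx + (P.length : Int) by omega) hin
      · exact ⟨hym, hold⟩

-- parallel run of one candidate row of positions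
theorem tryBys_par (n : Int) (m : Int) (board : List (List Int)) (P : List (List Int))
    (masks rows : List Nat)
    (hM : MRel n m board masks)
    (hP : P ≠ []) (hrows : ∀ row ∈ P, P.headI.length ≤ row.length)
    (hR : RSpec P ((P.length : Int)) ((P.headI.length : Int)) rows)
    (bx : Int) (hbx : 0 ≤ bx ∧ bx + (P.length : Int) ≤ n)
    (bys : List Int) (hbys : ∀ b ∈ bys, 0 ≤ b ∧ b + (P.headI.length : Int) ≤ m) :
    (tryBys board P bx bys = some none ∧
      dropBys masks rows (packStripes (fun i => PySem.List.pyGetD masks (bx + i) 0) m ((P.length : Int)))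
        (packStripes (fun i => PySem.List.pyGetD rows i 0) m ((P.length : Int))) bx ((P.length : Int)) bys
        = (false, masks)) ∨
    (∃ b' f', tryBys board P bx bys = some (some b') ∧
      dropBys masks rows (packStripes (fun i => PySem.List.pyGetD masks (bx + i) 0) m ((P.length : Int)))
        (packStripes (fun i => PySem.List.pyGetD rows i 0) m ((P.length : Int))) bx ((P.length : Int)) bys
        = (true, f') ∧ MRel n m b' f') := by
  induction bys with
  | nil => exact Or.inl ⟨rfl, rfl⟩
  | cons by_ rest ih =>
    have hst := stickA_spec n m board P hM.1 hP hrows bx by_ hbx (hbys by_ (by simp))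
    have hfit := fit_iff n m board P masks rows hM hR bx by_ hbx (hbys by_ (by simp))
    by_cases hoc : OC board P bx by_
    · have hsa := hst.1 hoc
      have hnfit : ¬ ((packStripes (fun i => PySem.List.pyGetD masks (bx + i) 0) m ((P.length : Int))) &&&
          ((packStripes (fun i => PySem.List.pyGetD rows i 0) m ((P.length : Int))) <<< by_.toNat) = 0) :=
        fun hh => (hfit.mp hh) hoc
      rcases ih (fun a ha => hbys a (by simp [ha])) with ⟨h1, h2⟩ | ⟨b', f', h1, h2, hM'⟩
      · refine Or.inl ⟨?_, ?_⟩
        · simp only [tryBys, hsa, h1]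
        · simp only [dropBys, if_neg hnfit, h2]
      · refine Or.inr ⟨b', f', ?_, ?_, hM'⟩
        · simp only [tryBys, hsa, h1]
        · simp only [dropBys, if_neg hnfit, h2]
    · obtain ⟨b', hsa, hS', hcell⟩ := hst.2 hoc
      have hfit' := hfit.mpr hoc
      refine Or.inr ⟨b', _, ?_, ?_, place_MRel n m board b' P masks rows bx by_ hM hR hbx
        (hbys by_ (by simp)) hS' hcell⟩
      · simp only [tryBys, hsa]
      · simp only [dropBys, if_pos hfit']

theorem tryBxs_par (n : Int) (m : Int) (board : List (List Int)) (P : List (List Int))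
    (masks rows : List Nat)
    (hM : MRel n m board masks)
    (hP : P ≠ []) (hrows : ∀ row ∈ P, P.headI.length ≤ row.length)
    (hR : RSpec P ((P.length : Int)) ((P.headI.length : Int)) rows)
    (bys : List Int) (hbys : ∀ b ∈ bys, 0 ≤ b ∧ b + (P.headI.length : Int) ≤ m)
    (bxs : List Int) (hbxs : ∀ b ∈ bxs, 0 ≤ b ∧ b + (P.length : Int) ≤ n) :
    (tryBxs board P bys bxs = some none ∧
      dropBxs masks rows (packStripes (fun i => PySem.List.pyGetD rows i 0) m ((P.length : Int)))
        ((P.length : Int)) m bys bxs = (false, masks)) ∨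
    (∃ b' f', tryBxs board P bys bxs = some (some b') ∧
      dropBxs masks rows (packStripes (fun i => PySem.List.pyGetD rows i 0) m ((P.length : Int)))
        ((P.length : Int)) m bys bxs = (true, f') ∧ MRel n m b' f') := by
  induction bxs with
  | nil => exact Or.inl ⟨rfl, rfl⟩
  | cons bx rest ih =>
    rcases tryBys_par n m board P masks rows hM hP hrows hR bx (hbxs bx (by simp))
        bys hbys with ⟨h1, h2⟩ | ⟨b', f', h1, h2, hM'⟩
    · rcases ih (fun a ha => hbxs a (by simp [ha])) with ⟨h3, h4⟩ | ⟨b', f', h3, h4, hM'⟩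
      · exact Or.inl ⟨by simp only [tryBxs, h1, h3], by simp only [dropBxs, h2, h4]⟩
      · exact Or.inr ⟨b', f', by simp only [tryBxs, h1, h3], by simp only [dropBxs, h2, h4], hM'⟩
    · exact Or.inr ⟨b', f', by simp only [tryBxs, h1], by simp only [dropBxs, h2], hM'⟩

-- A fails with no candidate columns (bys = [])
theorem tryBxs_nil_bys (board : List (List Int)) (P : List (List Int)) (bxs : List Int) :
    tryBxs board P [] bxs = some none := by
  induction bxs with
  | nil => rfl
  | cons bx rest ih => simp only [tryBxs, tryBys, ih]

-- parallel run of tryStickA / dropB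
theorem tryStick_par (n : Int) (m : Int) (board : List (List Int)) (P : List (List Int))
    (masks rows : List Nat)
    (hM : MRel n m board masks) (hn : 1 ≤ n)
    (hP : P ≠ []) (hrows : ∀ row ∈ P, P.headI.length ≤ row.length)
    (hcz : P.headI.length = 0 → 0 ≤ m)
    (hR : RSpec P ((P.length : Int)) ((P.headI.length : Int)) rows) :
    (tryStickA board P = some (false, board) ∧
      dropB masks rows ((P.length : Int)) ((P.headI.length : Int)) n m = (false, masks)) ∨
    (∃ b' f', tryStickA board P = some (true, b') ∧
      dropB masks rows ((P.length : Int)) ((P.headI.length : Int)) n m = (true, f') ∧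
      MRel n m b' f') := by
  have hbne : board ≠ [] := by
    have := hM.1.1
    intro hh
    rw [hh] at this
    simp at this
    omega
  have hblen : ((board.length : Int)) = n := by
    have := hM.1.1
    omega
  have hbm : ((board.headI.length : Int)) = ((m.toNat : Nat) : Int) := by
    have := hM.1.2 board.headI (headI_mem board hbne)
    omega
  have e1 := head_get board hbne
  have e2 := head_get P hP
  by_cases hg : (P.length : Int) > n ∨ (P.headI.length : Int) > m
  · -- guard: B returns false immediately; A scans an empty range (of bx or of by)
    refine Or.inl ⟨?_, ?_⟩
    · rcases hg with hg | hg
      · have hnil : pyRange0 (n - (P.length : Int) + 1) = [] :=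
          PySem.List.pyRange_one_eq_nil (by omega)
        simp only [tryStickA, e1, e2, hbm, hblen, hnil, tryBxs]
      · have hc1 : 1 ≤ P.headI.length := by
          by_contra hc0
          have : P.headI.length = 0 := by omega
          have := hcz this
          omega
        have hnil : pyRange0 (((m.toNat : Nat) : Int) - (P.headI.length : Int) + 1) = [] :=
          PySem.List.pyRange_one_eq_nil (by omega)
        simp only [tryStickA, e1, e2, hbm, hblen, hnil, tryBxs_nil_bys]
    · simp only [dropB, if_pos hg]
  · have hm0 : 0 ≤ m := by
      rcases not_or.mp hg with ⟨_, h2⟩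
      have : (0 : Int) ≤ (P.headI.length : Int) := by positivity
      omega
    have hbm' : ((board.headI.length : Int)) = m := by omega
    have hbys : ∀ b ∈ pyRange0 (m - (P.headI.length : Int) + 1),
        0 ≤ b ∧ b + (P.headI.length : Int) ≤ m := by
      intro b hb
      obtain ⟨a, b2⟩ := PySem.List.mem_pyRange_one.mp hb
      exact ⟨a, by omega⟩
    have hbxs : ∀ b ∈ pyRange0 (n - (P.length : Int) + 1),
        0 ≤ b ∧ b + (P.length : Int) ≤ n := by
      intro b hb
      obtain ⟨a, b2⟩ := PySem.List.mem_pyRange_one.mp hb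
      exact ⟨a, by omega⟩
    rcases tryBxs_par n m board P masks rows hM hP hrows hR
        (pyRange0 (m - (P.headI.length : Int) + 1)) hbys
        (pyRange0 (n - (P.length : Int) + 1)) hbxs with ⟨h1, h2⟩ | ⟨b', f', h1, h2, hM'⟩
    · refine Or.inl ⟨?_, ?_⟩
      · simp only [tryStickA, e1, e2, hbm', hblen, h1]
      · simp only [dropB, if_neg hg, h2]
    · refine Or.inr ⟨b', f', ?_, ?_, hM'⟩
      · simp only [tryStickA, e1, e2, hbm', hblen, h1]
      · simp only [dropB, if_neg hg, h2]

-- RSpec transported through one rotation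
theorem rot_RSpec (P P' : List (List Int)) (rows : List Nat)
    (hP : P ≠ []) (hc1 : 1 ≤ P.headI.length)
    (hR : RSpec P ((P.length : Int)) ((P.headI.length : Int)) rows)
    (hlen' : P'.length = P.headI.length) (hrows' : ∀ row' ∈ P', row'.length = P.length)
    (hcells' : ∀ x y : Int, 0 ≤ x → x < (P.headI.length : Int) → 0 ≤ y → y < (P.length : Int) →
      cellAt P' x y = cellAt P ((P.length : Int) - 1 - y) x) :
    RSpec P' ((P'.length : Int)) ((P'.headI.length : Int))
      (rotB rows ((P.length : Int)) ((P.headI.length : Int))) := by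
  obtain ⟨hrlen, hrbit⟩ := hR
  have hP'ne : P' ≠ [] := by
    intro hh
    rw [hh] at hlen'
    simp at hlen'
    omega
  have hP'head : P'.headI.length = P.length := hrows' P'.headI (headI_mem P' hP'ne)
  constructor
  · rw [rotB]
    simp [pyRange0, PySem.List.length_pyRange_one, hlen']
  · intro i h0 h1 y
    have h1c : i < (P.headI.length : Int) := by
      have : ((P'.length : Nat) : Int) = ((P.headI.length : Nat) : Int) := by exact_mod_cast hlen'
      omega
    rw [show PySem.List.pyGetD (rotB rows ((P.length : Int)) ((P.headI.length : Int))) i 0 =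
        colMaskB rows ((P.length : Int)) i from by
      unfold rotB
      simp only [pyRange0]
      exact PySem.List.pyGetD_map_pyRange_of_nonneg _ _ i _ h0 h1c]
    rw [colMaskB_testBit]
    have hheadcast : ((P'.headI.length : Nat) : Int) = ((P.length : Nat) : Int) := by
      exact_mod_cast hP'head
    constructor
    · rintro ⟨hyr, hbit⟩
      obtain ⟨hic, hcell⟩ := (hrbit ((P.length : Int) - 1 - (y : Int)) (by omega) (by omega)
        i.toNat).mp hbit
      refine ⟨by omega, ?_⟩
      rw [hcells' i ((y : Int)) h0 h1c (by positivity) hyr]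
      rw [show ((i.toNat : Nat) : Int) = i from by omega] at hcell
      exact hcell
    · rintro ⟨hyP', hcell⟩
      have hyr : (y : Int) < (P.length : Int) := by omega
      refine ⟨hyr, ?_⟩
      apply (hrbit ((P.length : Int) - 1 - (y : Int)) (by omega) (by omega) i.toNat).mpr
      rw [show ((i.toNat : Nat) : Int) = i from by omega]
      refine ⟨h1c, ?_⟩
      rw [← hcells' i ((y : Int)) h0 h1c (by positivity) hyr]
      exact hcell

-- rotLoop parallel run
theorem rotLoop_par (n : Int) (m : Int) (hn : 1 ≤ n) (k : Nat) :
    ∀ (board : List (List Int)) (P : List (List Int)) (masks rows : List Nat),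
      MRel n m board masks → GoodP n m P →
      RSpec P ((P.length : Int)) ((P.headI.length : Int)) rows →
      ∃ b', rotLoopA board P k = some b' ∧
        MRel n m b' (rotLoopB masks rows ((P.length : Int)) ((P.headI.length : Int)) n m k) := by
  induction k with
  | zero => intro board P masks rows hM _ _; exact ⟨board, rfl, hM⟩
  | succ k ih =>
    intro board P masks rows hM hG hR
    obtain ⟨hP, hrows, hvert⟩ := hG
    rcases tryStick_par n m board P masks rows hM hn hP hrows (fun h => (hvert h).2) hR with
      ⟨h1, h2⟩ | ⟨b', f', h1, h2, hM'⟩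
    · -- failure: the paper cannot be all-zero-width (it would have stuck at (0,0))
      have hc1 : 1 ≤ P.headI.length := by
        by_contra hc0
        have hc0' : P.headI.length = 0 := by omega
        obtain ⟨hrle, hm0⟩ := hvert hc0'
        -- with c = 0 the fit test at the first position succeeds
        have hgf : ¬ ((P.length : Int) > n ∨ (P.headI.length : Int) > m) :=
          not_or.mpr ⟨by omega, by rw [hc0']; push_cast; omega⟩
        have hrows0 : ∀ i : Int, 0 ≤ i → i < (P.length : Int) →
            PySem.List.pyGetD rows i 0 = 0 := by
          intro i h0 h1
          rw [eq_zero_iff_testBit]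
          intro t
          by_contra hbit
          have hb : (PySem.List.pyGetD rows i 0).testBit t = true := by
            cases hbb : (PySem.List.pyGetD rows i 0).testBit t
            · exact absurd hbb hbit
            · rfl
          have := (hR.2 i h0 h1 t).mp hb
          rw [hc0'] at this
          omega
        have hpp : packStripes (fun i => PySem.List.pyGetD rows i 0) m ((P.length : Int)) = 0 := by
          rw [eq_zero_iff_testBit]
          intro t
          rw [packStripes_testBit]
          rw [List.any_eq_false]
          intro i hi
          obtain ⟨a, b⟩ := PySem.List.mem_pyRange_one.mp hi
          rw [hrows0 i a b]
          simp
        have hbxcons : pyRange0 (n - (P.length : Int) + 1) =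
            0 :: PySem.List.pyRange 1 (n - (P.length : Int) + 1) := by
          simpa using PySem.List.pyRange_one_cons (a := 0) (b := n - (P.length : Int) + 1)
            (by omega)
        have hbycons : pyRange0 (m - (P.headI.length : Int) + 1) =
            0 :: PySem.List.pyRange 1 (m - (P.headI.length : Int) + 1) := by
          simpa using PySem.List.pyRange_one_cons (a := 0)
            (b := m - (P.headI.length : Int) + 1) (by rw [hc0']; push_cast; omega)
        have hfit0 : (dropB masks rows ((P.length : Int)) ((P.headI.length : Int)) n m).1 = true := by
          rw [dropB, if_neg hgf, hbxcons, hbycons]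
          simp only [dropBxs, dropBys, hpp]
          simp
        rw [h2] at hfit0
        simp at hfit0
      obtain ⟨P', hrot, hlen', hrows', hcells'⟩ := rotateA_some P hP hrows
      have hP'ne : P' ≠ [] := by
        intro hh
        rw [hh] at hlen'
        simp at hlen'
        omega
      have hP'head : P'.headI.length = P.length := hrows' P'.headI (headI_mem P' hP'ne)
      have hG' : GoodP n m P' := by
        refine ⟨hP'ne, ?_, ?_⟩
        · intro row' hrow'
          rw [hP'head, hrows' row' hrow']
        · intro hh
          rw [hP'head] at hh
          exact absurd hh (by
            intro hz
            rw [List.length_eq_zero_iff] at hz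
            exact hP hz)
      have hR' := rot_RSpec P P' rows hP hc1 hR hlen' hrows' hcells'
      obtain ⟨b', hA', hM'⟩ := ih board P' masks
        (rotB rows ((P.length : Int)) ((P.headI.length : Int))) hM hG' hR'
      refine ⟨b', ?_, ?_⟩
      · simp only [rotLoopA, h1, hrot, Option.bind_some, hA']
      · have e3 : ((P'.length : Int)) = ((P.headI.length : Int)) := by rw [hlen']
        have e4 : ((P'.headI.length : Int)) = ((P.length : Int)) := by rw [hP'head]
        rw [e3, e4] at hM'
        simpa only [rotLoopB, h2] using hM'
    · refine ⟨b', ?_, ?_⟩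
      · simp only [rotLoopA, h1]
      · simp only [rotLoopB, h2]
        exact hM'

-- rows masks computed from a paper satisfy RSpec
theorem rows_RSpec (p : List (List Int)) (hP : p ≠ [])
    (hrows : ∀ row ∈ p, p.headI.length ≤ row.length) :
    RSpec p ((p.length : Int)) ((p.headI.length : Int))
      ((pyRange0 ((p.length : Int))).map (fun i =>
        rowMaskB (PySem.List.pyGetD p i []) (((PySem.List.pyGetD p 0 []).length : Int)))) := by
  rw [getD_zero_headI p hP]
  constructor
  · simp [pyRange0, PySem.List.length_pyRange_one]
  · intro i h0 h1 y
    rw [show PySem.List.pyGetD ((pyRange0 ((p.length : Int))).map (fun i =>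
        rowMaskB (PySem.List.pyGetD p i []) ((p.headI.length : Int)))) i 0 =
      rowMaskB (PySem.List.pyGetD p i []) ((p.headI.length : Int)) from by
      simp only [pyRange0]
      exact PySem.List.pyGetD_map_pyRange_of_nonneg _ _ i _ h0 h1]
    rw [rowMaskB_testBit]
    rfl

theorem papersLoop_par (n : Int) (m : Int) (hn : 1 ≤ n)
    (papers : List (List (List Int))) (hpre : ∀ p ∈ papers, GoodP n m p) :
    ∀ (board : List (List Int)) (masks : List Nat), MRel n m board masks →
      ∃ b', papersLoopA board papers = some b' ∧
        MRel n m b' (papersLoopB n m masks papers) := by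
  induction papers with
  | nil => intro board masks hM; exact ⟨board, rfl, hM⟩
  | cons p ps ih =>
    intro board masks hM
    obtain ⟨hPne, hrows, hvert⟩ := hpre p (by simp)
    have hhead0 : PySem.List.pyGetD p 0 [] = p.headI := by
      cases p with
      | nil => exact absurd rfl hPne
      | cons a t =>
        rw [PySem.List.pyGetD_ofNat']
        rfl
    have hR := rows_RSpec p hPne hrows
    obtain ⟨b1, hA1, hM1⟩ := rotLoop_par n m hn 4 board p masks _ hM ⟨hPne, hrows, hvert⟩ hR
    obtain ⟨b', hA2, hM'⟩ := ih (fun a ha => hpre a (by simp [ha])) b1 _ hM1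
    refine ⟨b', ?_, ?_⟩
    · simp only [papersLoopA, hA1, Option.bind_some, hA2]
    · rw [hhead0] at hM'
      simp only [papersLoopB, hhead0]
      exact hM'

-- final count equality
theorem count_eq (n : Int) (m : Int) (board : List (List Int)) (masks : List Nat)
    (hM : MRel n m board masks) :
    countA n m board = masks.foldl (fun acc row =>
      (pyRange0 m).foldl (fun acc2 y => acc2 + (((row >>> y.toNat) &&& 1 : Nat) : Int)) acc) 0 := by
  obtain ⟨hS, hlen, hbit⟩ := hM
  by_cases hn : 0 ≤ n
  · have hcast : ((masks.length : Nat) : Int) = n := by omega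
    rw [show masks.foldl (fun acc row =>
        (pyRange0 m).foldl (fun acc2 y => acc2 + (((row >>> y.toNat) &&& 1 : Nat) : Int)) acc) 0 =
      (pyRange0 ((masks.length : Int))).foldl (fun acc i =>
        (pyRange0 m).foldl (fun acc2 y =>
          acc2 + ((((PySem.List.pyGetD masks i 0) >>> y.toNat) &&& 1 : Nat) : Int)) acc) 0 from
      (PySem.List.foldl_pyRange_zero_pyGetD' masks 0 _ 0).symm]
    rw [hcast]
    unfold countA
    apply PySem.List.foldl_congr_mem
    intro acc x hx
    obtain ⟨hx0, hx1⟩ := PySem.List.mem_pyRange_one.mp hx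
    apply PySem.List.foldl_congr_mem
    intro acc2 y hy
    obtain ⟨hy0, hy1⟩ := PySem.List.mem_pyRange_one.mp hy
    rw [and_one_testBit]
    have hyc : ((y.toNat : Nat) : Int) = y := by omega
    by_cases hb : (PySem.List.pyGetD masks x 0).testBit y.toNat
    · obtain ⟨hym, hcell⟩ := (hbit x hx0 hx1 y.toNat).mp hb
      rw [hyc] at hcell
      rw [if_pos (show PySem.List.pyGetD (PySem.List.pyGetD board x []) y 0 = 1 from hcell),
        if_pos hb]
      norm_num
    · have hnc : ¬ PySem.List.pyGetD (PySem.List.pyGetD board x []) y 0 = 1 := by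
        intro hc
        apply hb
        apply (hbit x hx0 hx1 y.toNat).mpr
        rw [hyc]
        exact ⟨by omega, hc⟩
      rw [if_neg hnc, if_neg hb]
      norm_num
  · have hm0 : masks = [] := by
      rw [← List.length_eq_zero_iff]
      omega
    have hr0 : pyRange0 n = [] := PySem.List.pyRange_one_eq_nil (by omega)
    rw [hm0]
    unfold countA
    rw [hr0]
    rfl

theorem initial_MRel (n : Int) (m : Int) :
    MRel n m ((pyRange0 n).map (fun _ => PySem.List.pyRepeat [(0 : Int)] m))
      (PySem.List.pyRepeat [(0 : Nat)] n) := by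
  refine ⟨⟨?_, ?_⟩, ?_, ?_⟩
  · simp [pyRange0, PySem.List.length_pyRange_one]
  · intro row hrow
    obtain ⟨x, _, rfl⟩ := List.mem_map.mp hrow
    simp [PySem.List.pyRepeat_singleton]
  · rw [PySem.List.pyRepeat_singleton, List.length_replicate]
  · intro x hx0 hx1 y
    rw [PySem.List.pyRepeat_singleton]
    have hgd : PySem.List.pyGetD (List.replicate n.toNat (0 : Nat)) x 0 = 0 := by
      rw [PySem.List.pyGetD_eq_getElem _ _ hx0 (by simp; omega)]
      simp
    rw [hgd, Nat.zero_testBit]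
    simp only [Bool.false_eq_true, false_iff, not_and]
    intro hym
    intro hcell
    rw [show cellAt ((pyRange0 n).map (fun _ => PySem.List.pyRepeat [(0 : Int)] m)) x (y : Int) =
        PySem.List.pyGetD (PySem.List.pyRepeat [(0 : Int)] m) (y : Int) 0 from by
      unfold cellAt
      simp only [pyRange0]
      rw [PySem.List.pyGetD_map_pyRange_of_nonneg _ _ x _ hx0 hx1]] at hcell
    rw [PySem.List.pyRepeat_singleton] at hcell
    rw [PySem.List.pyGetD_eq_getElem _ _ (by positivity) (by simp; omega)] at hcell
    simp at hcell

-- ===== VERDICT (by name: the statement is the Claim_ definition above) =====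
theorem solve_spec : Claim_equal_solve := by
  intro n m papers hdom hpre
  unfold Spec_solve solve solve_alt
  obtain ⟨hn_or, hgood⟩ := hpre
  by_cases hps : papers = []
  · subst hps
    simp only [papersLoopA, papersLoopB]
    exact count_eq n m _ _ (initial_MRel n m)
  · have hn : 1 ≤ n := hn_or.resolve_left hps
    obtain ⟨b', hA, hM⟩ := papersLoop_par n m hn papers
      (fun p hp => hgood p hp) _ _ (initial_MRel n m)
    simp only [hA]
    exact count_eq n m b' _ hM
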